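-- pv_equiv track=rewrite | github.com/lllx125/Obfuscated-NNG | canonical/check_canonical.py | check_results_consistency
-- ===== SOURCE A (Python) =====
-- from typing import List, Dict, Set, Tuple
--
-- def check_results_consistency(results: List[Dict]) -> bool:
--     """
--     Check if all datasets have identical failed theorem IDs.
--
--     Returns:
--         True if all datasets have identical results, False otherwise
--     """
--     if not results:
--         return True
--
--     # Get the first dataset's failed IDs as reference
--     reference_failed_ids = set(results[0]['failed_ids'])
--
--     # Compare all other datasets
--     all_identical = True
--     for result in results[1:]:
--         if set(result['failed_ids']) != reference_failed_ids:
--             all_identical = False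
--             break
--
--     return all_identical
-- ===== SOURCE B (Python) =====
-- def check_results_consistency(results):
--     """
--     Check if all datasets have identical failed theorem IDs.
--
--     Returns:
--         True if all datasets have identical results, False otherwise
--     """
--     return len({frozenset(r['failed_ids']) for r in results}) <= 1
-- ===== Notes on version B (the rewrite author's own statement) =====
-- stated objective: simpler
-- what changed: Instead of fixing the first dataset's id-set as a reference and scanning the rest with a mismatch flag and early break, B aggregates every dataset's failed_ids into one set of frozensets and returns whether its cardinality is at most one.
-- outside the precondition, e.g. on check_results_consistency([{'failed_ids': ['a']}, {'failed_ids': ['b']}, {}]): A returns False, B raises KeyError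
import Mathlib
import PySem

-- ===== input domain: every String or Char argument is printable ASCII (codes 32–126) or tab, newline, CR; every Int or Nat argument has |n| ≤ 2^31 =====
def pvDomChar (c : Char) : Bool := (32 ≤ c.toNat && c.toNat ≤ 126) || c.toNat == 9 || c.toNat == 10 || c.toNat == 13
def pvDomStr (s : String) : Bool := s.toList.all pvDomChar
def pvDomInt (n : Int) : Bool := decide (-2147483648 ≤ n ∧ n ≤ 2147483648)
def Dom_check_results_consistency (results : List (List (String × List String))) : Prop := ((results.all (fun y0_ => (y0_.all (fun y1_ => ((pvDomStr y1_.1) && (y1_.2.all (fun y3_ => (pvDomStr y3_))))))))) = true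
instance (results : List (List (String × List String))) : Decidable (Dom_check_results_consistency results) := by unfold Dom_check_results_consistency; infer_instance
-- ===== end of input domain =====

-- B replaces A's reference-set-plus-mismatch-flag scan (with early break) by collecting the
-- distinct id-sets of ALL datasets into one set of frozensets and testing its cardinality ≤ 1 (objective: simpler).

-- ===== PORT A =====
-- r['failed_ids'] (Pre_ guarantees the key is present; outside Pre_ Python raises KeyError)
def pvAGetIds (r : List (String × List String)) : List String :=
  ((PySem.Dict.mk r).get? "failed_ids").getD []

-- the 'for result in results[1:]' loop: flag set to False + break = return False at first mismatch
def pvALoop (ref : PySem.Set String) : List (List (String × List String)) → Bool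
  | [] => true
  | r :: rest =>
    if !(PySem.Set.equal (PySem.Set.ofList (pvAGetIds r)) ref) then false
    else pvALoop ref rest

def check_results_consistency (results : List (List (String × List String))) : Bool :=
  match results with
  | [] => true
  | r0 :: rest => pvALoop (PySem.Set.ofList (pvAGetIds r0)) rest

-- ===== PORT B =====
-- frozenset(r['failed_ids']), represented canonically as the sorted list of its distinct elements
-- (exact: two frozensets are equal iff they have the same elements iff their canonical forms coincide)
def pvBFrozen (r : List (String × List String)) : List String :=
  PySem.List.sorted (PySem.Set.ofList (((PySem.Dict.mk r).get? "failed_ids").getD [])) (fun x => x) false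

def check_results_consistency_alt (results : List (List (String × List String))) : Bool :=
  decide ((PySem.Set.ofList (results.map pvBFrozen)).length ≤ 1)

-- ===== PRECONDITION & SPEC =====
-- Pre_ requires every dataset to carry the key 'failed_ids'. It excludes the KeyError inputs, and also
-- inputs where a dataset after A's early break lacks the key: there A's returning False instead of raising
-- is an accident of the break position, and B (which aggregates all datasets) itself raises KeyError.
def Pre_check_results_consistency (results : List (List (String × List String))) : Prop :=
  ∀ r ∈ results, (PySem.Dict.mk r).contains "failed_ids" = true
instance (results : List (List (String × List String))) : Decidable (Pre_check_results_consistency results) := by unfold Pre_check_results_consistency; infer_instance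

def pvWitness_check_results_consistency : (List (List (String × List String))) :=
  [[("failed_ids", ["a", "b"])], [("failed_ids", ["b", "a", "a"])]]

def Spec_check_results_consistency (results : List (List (String × List String))) (out : Bool) : Prop := out = check_results_consistency_alt results
instance (results : List (List (String × List String))) (out : Bool) : Decidable (Spec_check_results_consistency results out) := by unfold Spec_check_results_consistency; infer_instance

-- ===== CLAIM (what is proved, stated in full; the proofs are below) =====
def Claim_equal_check_results_consistency : Prop := ∀ (results : List (List (String × List String))), Dom_check_results_consistency results → Pre_check_results_consistency results → Spec_check_results_consistency results (check_results_consistency results)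

-- ===== LEMMAS AND PROOFS =====

-- set(xs) == set(ys) iff the canonical (sorted distinct) forms coincide
theorem pv_equal_iff_canon (xs ys : List String) :
    PySem.Set.equal (PySem.Set.ofList xs) (PySem.Set.ofList ys) = true ↔
      PySem.List.sorted (PySem.Set.ofList xs) (fun x => x) false
        = PySem.List.sorted (PySem.Set.ofList ys) (fun x => x) false := by
  rw [PySem.Set.equal_iff]
  constructor
  · intro h
    refine PySem.List.sorted_eq_sorted_of_perm _ _ _ (fun a b hab => hab) ?_
    exact (List.perm_ext_iff_of_nodup (PySem.Set.nodup_ofList xs) (PySem.Set.nodup_ofList ys)).2 h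
  · intro h x
    constructor
    · intro hx
      have : x ∈ PySem.List.sorted (PySem.Set.ofList xs) (fun x => x) false :=
        (PySem.List.mem_sorted _ _ _ _).2 hx
      rw [h] at this
      exact (PySem.List.mem_sorted _ _ _ _).1 this
    · intro hx
      have : x ∈ PySem.List.sorted (PySem.Set.ofList ys) (fun x => x) false :=
        (PySem.List.mem_sorted _ _ _ _).2 hx
      rw [← h] at this
      exact (PySem.List.mem_sorted _ _ _ _).1 this

theorem pv_aloop_eq_all (ref : PySem.Set String) (rs : List (List (String × List String))) :
    pvALoop ref rs = rs.all (fun r => PySem.Set.equal (PySem.Set.ofList (pvAGetIds r)) ref) := by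
  induction rs with
  | nil => rfl
  | cons r rest ih =>
    simp only [pvALoop, List.all_cons, ih]
    by_cases h : PySem.Set.equal (PySem.Set.ofList (pvAGetIds r)) ref = true
    · simp [h]
    · simp [Bool.eq_false_iff.2 h]

-- |set(k0 :: ks)| ≤ 1 iff every element of ks equals k0
theorem pv_len_ofList_cons_le_one (k0 : List String) (ks : List (List String)) :
    (PySem.Set.ofList (k0 :: ks)).length ≤ 1 ↔ ∀ k ∈ ks, k = k0 := by
  rw [PySem.Set.ofList_cons]
  have hlen : List.length ((PySem.Set.ofList ks).discard k0) + 1 ≤ 1 ↔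
      ((PySem.Set.ofList ks).discard k0) = [] := by
    rw [← List.length_eq_zero_iff]; omega
  simp only [List.length_cons, hlen]
  rw [List.eq_nil_iff_forall_not_mem]
  constructor
  · intro h k hk
    by_contra hne
    exact h k ((PySem.Set.mem_discard _ _ _).2 ⟨(PySem.Set.mem_ofList _ _).2 hk, hne⟩)
  · intro h y hy
    obtain ⟨hy1, hy2⟩ := (PySem.Set.mem_discard _ _ _).1 hy
    exact hy2 (h y ((PySem.Set.mem_ofList _ _).1 hy1))

-- ===== VERDICT (by name: the statement is the Claim_ definition above) =====
theorem check_results_consistency_spec : Claim_equal_check_results_consistency := by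
  intro results _ _
  unfold Spec_check_results_consistency
  match results with
  | [] => rfl
  | r0 :: rest =>
    simp only [check_results_consistency, check_results_consistency_alt, List.map_cons,
      pv_aloop_eq_all]
    rw [Bool.eq_iff_iff]
    rw [List.all_eq_true, decide_eq_true_iff, pv_len_ofList_cons_le_one]
    constructor
    · intro h k hk
      obtain ⟨r, hr, rfl⟩ := List.mem_map.1 hk
      exact (pv_equal_iff_canon (pvAGetIds r) (pvAGetIds r0)).1 (h r hr)
    · intro h r hr
      exact (pv_equal_iff_canon (pvAGetIds r) (pvAGetIds r0)).2
        (h (pvBFrozen r) (List.mem_map.2 ⟨r, hr, rfl⟩))
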